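-- pv_equiv track=rewrite | github.com/Biocodings/qtip | src/ts.py | parse_aligner_parameters_from_argv
-- ===== SOURCE A (Python) =====
-- def parse_aligner_parameters_from_argv(argv):
--     argv = argv[:]
--     sections = [[]]
--     for arg in argv:
--         if arg == '--':
--             sections.append([])
--         else:
--             sections[-1].append(arg)
--     new_argv = sections[0]
--     aligner_args = [] if len(sections) < 2 else sections[1]
--     aligner_unpaired_args = [] if len(sections) < 3 else sections[2]
--     aligner_paired_args = [] if len(sections) < 4 else sections[3]
--     return new_argv, aligner_args, aligner_unpaired_args, aligner_paired_args
-- ===== SOURCE B (Python) =====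
-- def parse_aligner_parameters_from_argv(argv):
--     remaining = argv[:]
--     collected = []
--     for _ in range(4):
--         try:
--             i = remaining.index('--')
--             collected.append(remaining[:i])
--             remaining = remaining[i + 1:]
--         except ValueError:
--             collected.append(remaining)
--             remaining = []
--     return collected[0], collected[1], collected[2], collected[3]
-- ===== Notes on version B (the rewrite author's own statement) =====
-- stated objective: alternative
-- what changed: A makes one forward pass appending each arg to the last of a growing list of sections; B instead repeats find-next-'--'/slice four times on a shrinking remainder (index + take/drop), never maintaining a sections accumulator.
import Mathlib
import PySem

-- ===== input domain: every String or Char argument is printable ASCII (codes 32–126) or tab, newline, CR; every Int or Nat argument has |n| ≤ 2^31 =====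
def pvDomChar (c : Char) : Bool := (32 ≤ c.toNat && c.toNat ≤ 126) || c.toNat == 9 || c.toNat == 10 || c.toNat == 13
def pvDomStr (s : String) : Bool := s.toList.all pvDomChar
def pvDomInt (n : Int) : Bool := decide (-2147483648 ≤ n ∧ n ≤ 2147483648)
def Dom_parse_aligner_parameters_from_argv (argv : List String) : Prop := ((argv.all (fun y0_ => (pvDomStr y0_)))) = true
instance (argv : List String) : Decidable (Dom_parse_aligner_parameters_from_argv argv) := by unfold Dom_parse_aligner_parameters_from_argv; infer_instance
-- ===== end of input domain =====

-- B replaces A's single forward pass (grow-last-section accumulator) by four find-'--'/slice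
-- steps on a shrinking remainder (objective: alternative decomposition, same cost).

-- ===== PORT A =====
-- sections[-1].append(arg): rebuild the list with the last element extended
def pvUpdateLast (secs : List (List String)) (arg : String) : List (List String) :=
  match secs with
  | [] => []
  | [s] => [s ++ [arg]]
  | s :: rest => s :: pvUpdateLast rest arg

-- loop body: '--' starts a new empty section, otherwise append to the last section
def pvStepA (secs : List (List String)) (arg : String) : List (List String) :=
  if arg = "--" then secs ++ [[]] else pvUpdateLast secs arg

def parse_aligner_parameters_from_argv (argv : List String) :
    List String × List String × List String × List String :=
  -- argv = argv[:] copies the list; irrelevant for the returned value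
  let sections := argv.foldl pvStepA [[]]
  -- sections[0] never raises: sections is always non-empty, so getD 0 is exact
  let new_argv := sections.getD 0 []
  let aligner_args := if sections.length < 2 then [] else sections.getD 1 []
  let aligner_unpaired_args := if sections.length < 3 then [] else sections.getD 2 []
  let aligner_paired_args := if sections.length < 4 then [] else sections.getD 3 []
  (new_argv, aligner_args, aligner_unpaired_args, aligner_paired_args)

-- ===== PORT B =====
-- one iteration of Source B's loop over the state (remaining, collected);
-- remaining[:i] / remaining[i+1:] with 0 ≤ i < len(remaining) are exactly take i / drop (i+1)
def pvStepB (st : List String × List (List String)) : List String × List (List String) :=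
  match PySem.List.index? st.1 "--" with
  | some i => (st.1.drop (i + 1), st.2 ++ [st.1.take i])
  | none => ([], st.2 ++ [st.1])

def parse_aligner_parameters_from_argv_alt (argv : List String) :
    List String × List String × List String × List String :=
  -- for _ in range(4): the loop body applied four times, starting from (argv[:], [])
  let st := pvStepB (pvStepB (pvStepB (pvStepB (argv, []))))
  -- collected has exactly 4 elements, so collected[k] = getD k is exact
  (st.2.getD 0 [], st.2.getD 1 [], st.2.getD 2 [], st.2.getD 3 [])

-- ===== PRECONDITION & SPEC =====
def Spec_parse_aligner_parameters_from_argv (argv : List String) (out : List String × List String × List String × List String) : Prop := out = parse_aligner_parameters_from_argv_alt argv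
instance (argv : List String) (out : List String × List String × List String × List String) : Decidable (Spec_parse_aligner_parameters_from_argv argv out) := by unfold Spec_parse_aligner_parameters_from_argv; infer_instance

-- ===== CLAIM (what is proved, stated in full; the proofs are below) =====
def Claim_equal_parse_aligner_parameters_from_argv : Prop := ∀ (argv : List String), Dom_parse_aligner_parameters_from_argv argv → Spec_parse_aligner_parameters_from_argv argv (parse_aligner_parameters_from_argv argv)

-- ===== LEMMAS AND PROOFS =====

-- canonical splitter: the list of '--'-separated chunks of the input
def pvSpl : List String → List (List String)
  | [] => [[]]
  | a :: t =>
    if a = "--" then [] :: pvSpl t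
    else
      match pvSpl t with
      | [] => [[a]]
      | h :: r => (a :: h) :: r

lemma pvSpl_ne_nil (l : List String) : pvSpl l ≠ [] := by
  cases l with
  | nil => simp [pvSpl]
  | cons a t =>
    simp only [pvSpl]
    split_ifs
    · simp
    · cases h : pvSpl t <;> simp

def pvConsHead (cur : List String) : List (List String) → List (List String)
  | [] => [cur]
  | h :: r => (cur ++ h) :: r

lemma pvUpdateLast_cons (a : List String) (l : List (List String)) (h : l ≠ []) (arg : String) :
    pvUpdateLast (a :: l) arg = a :: pvUpdateLast l arg := by
  cases l with
  | nil => exact absurd rfl h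
  | cons b r => rfl

lemma pvUpdateLast_append (init : List (List String)) (cur : List String) (arg : String) :
    pvUpdateLast (init ++ [cur]) arg = init ++ [cur ++ [arg]] := by
  induction init with
  | nil => rfl
  | cons a t ih =>
    rw [List.cons_append, pvUpdateLast_cons a (t ++ [cur]) (by simp) arg, ih]
    rfl

lemma foldA_spl (argv : List String) :
    ∀ (init : List (List String)) (cur : List String),
      List.foldl pvStepA (init ++ [cur]) argv = init ++ pvConsHead cur (pvSpl argv) := by
  induction argv with
  | nil => intro init cur; simp [pvSpl, pvConsHead]
  | cons a t ih =>
    intro init cur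
    by_cases h : a = "--"
    · subst h
      rw [List.foldl_cons]
      have hs : pvStepA (init ++ [cur]) "--" = (init ++ [cur]) ++ [[]] := by
        simp [pvStepA]
      rw [hs, List.append_assoc] at *
      rw [show (init ++ ([cur] ++ [[]])) = ((init ++ [cur]) ++ [([] : List String)]) by simp]
      rw [ih (init ++ [cur]) []]
      have : pvSpl ("--" :: t) = [] :: pvSpl t := by simp [pvSpl]
      rw [this]
      cases hsp : pvSpl t with
      | nil => exact absurd hsp (pvSpl_ne_nil t)
      | cons hd r => simp [pvConsHead]
    · rw [List.foldl_cons]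
      have hs : pvStepA (init ++ [cur]) a = init ++ [cur ++ [a]] := by
        simp [pvStepA, h, pvUpdateLast_append]
      rw [hs, ih init (cur ++ [a])]
      have hspl : pvSpl (a :: t) =
          match pvSpl t with
          | [] => [[a]]
          | hd :: r => (a :: hd) :: r := by simp [pvSpl, h]
      cases hsp : pvSpl t with
      | nil => exact absurd hsp (pvSpl_ne_nil t)
      | cons hd r =>
        rw [hspl, hsp]
        simp [pvConsHead]

lemma sections_eq_spl (argv : List String) :
    List.foldl pvStepA [[]] argv = pvSpl argv := by
  have := foldA_spl argv [] []
  simp only [List.nil_append] at this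
  rw [this]
  cases h : pvSpl argv with
  | nil => exact absurd h (pvSpl_ne_nil argv)
  | cons hd r => simp [pvConsHead]

lemma spl_no_sep (l : List String) (h : "--" ∉ l) : pvSpl l = [l] := by
  induction l with
  | nil => rfl
  | cons a t ih =>
    simp only [List.mem_cons, not_or] at h
    simp [pvSpl, ih h.2]
    intro hc; exact absurd hc.symm h.1

lemma spl_append_sep (pre suf : List String) (h : "--" ∉ pre) :
    pvSpl (pre ++ "--" :: suf) = pre :: pvSpl suf := by
  induction pre with
  | nil => simp [pvSpl]
  | cons a t ih =>
    simp only [List.mem_cons, not_or] at h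
    have h1 : ¬ (a = "--") := fun hc => h.1 hc.symm
    simp only [List.cons_append, pvSpl, if_neg h1, ih h.2]

lemma stepB_snd (st : List String × List (List String)) :
    (pvStepB st).2 = st.2 ++ [(pvSpl st.1).getD 0 []] := by
  unfold pvStepB
  cases h : PySem.List.index? st.1 "--" with
  | none =>
    have hmem : "--" ∉ st.1 := (PySem.List.index?_eq_none_iff _ _).mp h
    simp [spl_no_sep st.1 hmem]
  | some i =>
    obtain ⟨pre, suf, heq, hlen, hpre⟩ := (PySem.List.index?_eq_some_iff _ _ _).mp h
    simp only [heq, spl_append_sep pre suf hpre, List.getD_cons_zero, ← hlen]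
    rw [List.take_left]

lemma stepB_getD (st : List String × List (List String)) (j : ℕ) :
    (pvSpl (pvStepB st).1).getD j [] = (pvSpl st.1).getD (j + 1) [] := by
  unfold pvStepB
  cases h : PySem.List.index? st.1 "--" with
  | none =>
    have hmem : "--" ∉ st.1 := (PySem.List.index?_eq_none_iff _ _).mp h
    rw [spl_no_sep st.1 hmem]
    cases j <;> simp [pvSpl]
  | some i =>
    obtain ⟨pre, suf, heq, hlen, hpre⟩ := (PySem.List.index?_eq_some_iff _ _ _).mp h
    have hdrop : (pre ++ "--" :: suf).drop (i + 1) = suf := by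
      rw [← hlen, show pre ++ "--" :: suf = (pre ++ ["--"]) ++ suf by simp,
        show pre.length + 1 = (pre ++ ["--"]).length by simp, List.drop_left]
    simp only [heq, hdrop, spl_append_sep pre suf hpre, List.getD_cons_succ]

lemma ite_getD (l : List (List String)) (n k : ℕ) (hk : n = k + 1) :
    (if l.length < n then [] else l.getD k []) = l.getD k [] := by
  split_ifs with h
  · rw [List.getD_eq_default]; omega
  · rfl

-- ===== VERDICT (by name: the statement is the Claim_ definition above) =====
theorem parse_aligner_parameters_from_argv_spec : Claim_equal_parse_aligner_parameters_from_argv := by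
  intro argv _
  unfold Spec_parse_aligner_parameters_from_argv
  unfold parse_aligner_parameters_from_argv parse_aligner_parameters_from_argv_alt
  simp only [sections_eq_spl]
  set st0 : List String × List (List String) := (argv, []) with hst0
  have h0 : pvSpl st0.1 = pvSpl argv := rfl
  have h0c : st0.2 = [] := rfl
  -- unfold the four steps of B using the two step lemmas
  set g : ℕ → List String := fun k => (pvSpl argv).getD k [] with hg
  have g0 : ∀ j, (pvSpl st0.1).getD j [] = g j := fun j => rfl
  have g1 : ∀ j, (pvSpl (pvStepB st0).1).getD j [] = g (j + 1) :=
    fun j => (stepB_getD st0 j).trans (g0 (j + 1))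
  have g2 : ∀ j, (pvSpl (pvStepB (pvStepB st0)).1).getD j [] = g (j + 2) :=
    fun j => (stepB_getD _ j).trans (g1 (j + 1))
  have g3 : ∀ j, (pvSpl (pvStepB (pvStepB (pvStepB st0))).1).getD j [] = g (j + 3) :=
    fun j => (stepB_getD _ j).trans (g2 (j + 1))
  have hcol : (pvStepB (pvStepB (pvStepB (pvStepB st0)))).2 = [g 0, g 1, g 2, g 3] := by
    rw [stepB_snd, stepB_snd, stepB_snd, stepB_snd, h0c, g0, g1 0, g2 0, g3 0]
    rfl
  rw [hcol]
  simp only [ite_getD _ 2 1 rfl, ite_getD _ 3 2 rfl, ite_getD _ 4 3 rfl]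
  rfl
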